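-- pv_equiv track=rewrite | github.com/JohnsonGeng/lintcode_exercise | 1789_done.py | DistinguishUsername
-- ===== SOURCE A (Python) =====
-- def DistinguishUsername(names):
--     # Write your code here
--     # 思路：利用字典记录某个元素出现了多少次，扫描数组，查看字典中是否出现，并加上出现次数即可
--     # 创建字典记录某个元素出现了多少次
--     dict = {}
--     for i in range(len(names)):
--         # 第一次出现
--         if names[i] not in dict.keys():
--             dict[names[i]] = 0
--         # 重复出现
--         else:
--             dict[names[i]] += 1
--             names[i] = names[i] + str(dict[names[i]])
--     return names
-- ===== SOURCE B (Python) =====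
-- def DistinguishUsername(names):
--     # Write your code here
--     # Stage 1: group the positions of every distinct name; Stage 2: per group,
--     # suffix each repeat occurrence with its occurrence number.
--     groups = {}
--     for i, x in enumerate(names):
--         groups.setdefault(x, []).append(i)
--     for x, idxs in groups.items():
--         for k, i in enumerate(idxs):
--             if k:
--                 names[i] = x + str(k)
--     return names
-- ===== Notes on version B (the rewrite author's own statement) =====
-- stated objective: alternative
-- what changed: B is a two-stage group-and-assign algorithm: one pass groups the indices of every distinct name into a dict of index lists, then a second stage walks each group and writes name+occurrence-number at each repeat position, instead of A's single pass that rewrites while maintaining a running count dict.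
import Mathlib
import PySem

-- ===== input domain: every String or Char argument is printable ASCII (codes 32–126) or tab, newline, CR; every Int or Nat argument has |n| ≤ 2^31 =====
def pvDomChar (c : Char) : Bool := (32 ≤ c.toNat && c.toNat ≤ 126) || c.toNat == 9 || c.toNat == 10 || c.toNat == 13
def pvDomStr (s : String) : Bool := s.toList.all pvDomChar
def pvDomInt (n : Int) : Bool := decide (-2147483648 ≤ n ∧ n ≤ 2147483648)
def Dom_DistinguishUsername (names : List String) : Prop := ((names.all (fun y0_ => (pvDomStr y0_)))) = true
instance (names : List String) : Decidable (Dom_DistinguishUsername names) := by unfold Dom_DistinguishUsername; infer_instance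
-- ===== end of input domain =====

-- B replaces A's single rewriting pass with a dict of running counts by a two-stage group-and-assign
-- algorithm (group the indices of every name, then suffix each repeat occurrence); alternative, not faster.
-- Both Pythons mutate `names` in place and return the same object — the equivalence here is about the
-- returned value.

-- ===== PORT A =====
-- the body of A's `for i in range(len(names))` loop; state = (dict, names)
def DistinguishUsernameStep (st : PySem.Dict String Int × List String) (i : Nat) :
    PySem.Dict String Int × List String :=
  let d := st.1
  let ns := st.2
  let x := PySem.List.pyGetD ns (i : Int) ""
  if d.contains x = false then
    (d.insert x 0, ns)
  else
    let v := d.getD x 0 + 1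
    (d.insert x v, PySem.List.pySetD ns (i : Int) (x ++ PySem.Int.toStr v))

def DistinguishUsername (names : List String) : List String :=
  ((List.range names.length).foldl DistinguishUsernameStep (PySem.Dict.empty, names)).2

-- ===== PORT B =====
-- stage 1: `groups.setdefault(x, []).append(i)` = append i to the dict entry of x (default [])
def AltGroups (names : List String) : PySem.Dict String (List Int) :=
  (PySem.List.enumerate names).foldl
    (fun d p => d.modify p.2 [] (fun t => t ++ [p.1])) PySem.Dict.empty

-- stage 2 inner-loop body: `for k, i in enumerate(idxs): if k: names[i] = x + str(k)`
def AltAssign (x : String) (ns : List String) (r : Int × Int) : List String :=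
  if r.1 ≠ 0 then PySem.List.pySetD ns r.2 (x ++ PySem.Int.toStr r.1) else ns

def DistinguishUsername_alt (names : List String) : List String :=
  (AltGroups names).items.foldl
    (fun ns q => (PySem.List.enumerate q.2).foldl (AltAssign q.1) ns) names

-- ===== PRECONDITION & SPEC =====
def Spec_DistinguishUsername (names : List String) (out : List String) : Prop := out = DistinguishUsername_alt names
instance (names : List String) (out : List String) : Decidable (Spec_DistinguishUsername names out) := by unfold Spec_DistinguishUsername; infer_instance

-- ===== CLAIM (what is proved, stated in full; the proofs are below) =====
def Claim_equal_DistinguishUsername : Prop := ∀ (names : List String), Dom_DistinguishUsername names → Spec_DistinguishUsername names (DistinguishUsername names)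

-- ===== LEMMAS AND PROOFS =====

-- the final value at index j: original name, suffixed with its prior-occurrence count when positive
def pvBval (names : List String) (j : Nat) : String :=
  let x := names.getD j ""
  let c := (names.take j).count x
  if c = 0 then x else x ++ PySem.Int.toStr (c : Int)

theorem pvBval_of_pos (names : List String) (k : Nat)
    (h : (names.take k).count (names.getD k "") ≠ 0) :
    pvBval names k
      = names.getD k "" ++ PySem.Int.toStr (((names.take k).count (names.getD k "") : Int)) := by
  simp only [pvBval]
  rw [if_neg h]

theorem pvBval_of_zero (names : List String) (k : Nat)
    (h : (names.take k).count (names.getD k "") = 0) :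
    pvBval names k = names.getD k "" := by
  simp only [pvBval]
  rw [if_pos h]

theorem pvSetD_natCast {α : Type} (xs : List α) (n : Nat) (v : α) (h : n < xs.length) :
    PySem.List.pySetD xs (n : Int) v = xs.set n v := by
  simp [PySem.List.pySetD, PySem.List.pySet?, PySem.List.pyIdx?, h]

theorem pvMap_range_set {α : Type} (f : Nat → α) (n k : Nat) (hk : k < n) (y : α) :
    ((List.range n).map f).set k y
      = (List.range n).map (fun j => if j = k then y else f j) := by
  apply List.ext_getElem
  · simp
  · intro i h1 h2
    simp only [List.length_set, List.length_map, List.length_range] at h1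
    rw [List.getElem_set]
    simp only [List.getElem_map, List.getElem_range]
    by_cases h : i = k
    · subst h; simp
    · rw [if_neg (fun hh => h hh.symm), if_neg h]

-- ===== A-side: loop invariant =====
-- after processing the first k indices, the dict holds (count in take k) - 1
-- for every name seen so far, and the list is the final value on the first k positions, untouched after.
theorem pvInv (names : List String) (k : Nat) (hk : k ≤ names.length) :
    (∀ x, ((List.range k).foldl DistinguishUsernameStep (PySem.Dict.empty, names)).1.get? x
        = if (names.take k).count x = 0 then none
          else some (((names.take k).count x : Int) - 1))
    ∧ ((List.range k).foldl DistinguishUsernameStep (PySem.Dict.empty, names)).2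
        = (List.range names.length).map
            (fun j => if j < k then pvBval names j else names.getD j "") := by
  induction k with
  | zero =>
    constructor
    · intro x; simp [PySem.Dict.get?_empty]
    · simp only [List.range_zero, List.foldl_nil]
      apply List.ext_getElem
      · simp
      · intro i h1 h2
        simp [List.getD, List.getElem?_eq_getElem h1]
  | succ k ih =>
    have hk' : k < names.length := lt_of_lt_of_le (Nat.lt_succ_self k) hk
    obtain ⟨ihd, ihn⟩ := ih (Nat.le_of_lt hk')
    rw [List.range_succ, List.foldl_append, List.foldl_cons, List.foldl_nil]
    set st := (List.range k).foldl DistinguishUsernameStep (PySem.Dict.empty, names) with hst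
    -- the element read at index k is the original names[k]
    have hx : PySem.List.pyGetD st.2 (k : Int) "" = names.getD k "" := by
      rw [PySem.List.pyGetD_natCast, ihn, PySem.List.getD_map_range _ _ _ _ hk']
      simp
    have htake : names.take (k + 1) = names.take k ++ [names.getD k ""] := by
      rw [List.take_add_one, List.getElem?_eq_getElem hk']
      simp [List.getD, List.getElem?_eq_getElem hk']
    have hcnt : ∀ y, (names.take (k+1)).count y
        = (names.take k).count y + (if names.getD k "" = y then 1 else 0) := by
      intro y
      rw [htake, List.count_append]
      simp [List.count_singleton, beq_iff_eq]
    -- keep the read element opaque so `simp` cannot unfold `List.getD` on one side only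
    obtain ⟨a, ha⟩ : ∃ a, names.getD k "" = a := ⟨_, rfl⟩
    rw [ha] at hx hcnt
    by_cases h0 : (names.take k).count a = 0
    · -- first occurrence: dict gets the name with value 0, list untouched
      have hcon : st.1.contains a = false := by
        rw [PySem.Dict.contains_eq_isSome_get?, ihd, if_pos h0]; rfl
      constructor
      · intro x
        simp only [DistinguishUsernameStep, hx, hcon]
        rw [if_pos trivial]
        dsimp only
        rw [PySem.Dict.get?_insert, ihd]
        by_cases hxy : x = a
        · subst hxy
          have hca : (names.take (k+1)).count x = 1 := by rw [hcnt x]; simp [h0]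
          rw [if_pos rfl, hca]
          norm_num
        · have hax : ¬ (a = x) := fun h => hxy h.symm
          have hcx : (names.take (k+1)).count x = (names.take k).count x := by
            rw [hcnt x]; simp [hax]
          rw [if_neg hxy, hcx]
      · simp only [DistinguishUsernameStep, hx, hcon]
        rw [if_pos trivial]
        dsimp only
        rw [ihn]
        apply List.map_congr_left
        intro j hj
        rw [List.mem_range] at hj
        by_cases hjk : j < k
        · simp [hjk, Nat.lt_succ_of_lt hjk]
        · by_cases hje : j = k
          · subst hje
            rw [if_neg (Nat.lt_irrefl _), if_pos (Nat.lt_succ_self _),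
              pvBval_of_zero _ _ (by rw [ha]; exact h0)]
          · have : ¬ j < k + 1 := by omega
            simp [hjk, this]
    · -- repeat: dict count bumped, names[k] gets the suffixed value
      have hcon : st.1.contains a = true := by
        rw [PySem.Dict.contains_eq_isSome_get?, ihd, if_neg h0]; rfl
      have hgetD : st.1.getD a 0 = ((names.take k).count a : Int) - 1 := by
        rw [PySem.Dict.getD_eq_get?_getD, ihd, if_neg h0]; rfl
      constructor
      · intro x
        simp only [DistinguishUsernameStep, hx, hcon, Bool.true_eq_false]
        rw [if_neg not_false]
        dsimp only
        rw [PySem.Dict.get?_insert, ihd, hgetD]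
        by_cases hxy : x = a
        · subst hxy
          have hca : (names.take (k+1)).count x = (names.take k).count x + 1 := by
            rw [hcnt x]; simp
          have hne : (names.take k).count x + 1 ≠ 0 := by omega
          rw [if_pos rfl, hca, if_neg hne]
          congr 1
          push_cast
          ring
        · have hax : ¬ (a = x) := fun h => hxy h.symm
          have hcx : (names.take (k+1)).count x = (names.take k).count x := by
            rw [hcnt x]; simp [hax]
          rw [if_neg hxy, hcx]
      · simp only [DistinguishUsernameStep, hx, hcon, Bool.true_eq_false]
        rw [if_neg not_false]
        dsimp only
        rw [hgetD, ihn,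
          pvSetD_natCast _ _ _ (by simp [hk'] : k < ((List.range names.length).map
            (fun j => if j < k then pvBval names j else names.getD j "")).length),
          pvMap_range_set _ _ _ hk']
        apply List.map_congr_left
        intro j hj
        rw [List.mem_range] at hj
        by_cases hje : j = k
        · subst hje
          rw [if_pos rfl, if_pos (Nat.lt_succ_self _),
            pvBval_of_pos _ _ (by rw [ha]; exact h0), ha]
          congr 2
          ring
        · by_cases hjk : j < k
          · simp [hje, hjk, Nat.lt_succ_of_lt hjk]
          · have : ¬ j < k + 1 := by omega
            simp [hje, hjk, this]

-- ===== B-side =====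
theorem pvTake_eq_map (names : List String) (j : Nat) (hj : j ≤ names.length) :
    names.take j = (List.range j).map (fun i => names.getD i "") := by
  apply List.ext_getElem
  · simp [hj]
  · intro i h1 h2
    simp only [List.length_take] at h1
    have hi : i < names.length := by omega
    simp [List.getD, List.getElem?_eq_getElem hi]

theorem pvCount_mono (names : List String) (x : String) (j a : Nat)
    (hja : j < a) (ha : a ≤ names.length) (hx : names.getD j "" = x) :
    (names.take j).count x < (names.take a).count x := by
  have h1 : names.take (j+1) = names.take j ++ [x] := by
    rw [List.take_add_one]
    have hg := List.getElem?_eq_getElem (lt_of_lt_of_le hja ha)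
    rw [hg]
    simp only [Option.toList_some]
    congr 1
    rw [← hx, List.getD_eq_getElem?_getD, hg]
    rfl
  have h2 : (names.take (j+1)).count x = (names.take j).count x + 1 := by
    rw [h1, List.count_append]; simp
  have h3 : (names.take (j+1)).count x ≤ (names.take a).count x := by
    apply List.Sublist.count_le
    exact List.take_sublist_take_left (by omega)
  omega

theorem pvCount_take (names : List String) (x : String) (j : Nat) (hj : j ≤ names.length) :
    (names.take j).count x = ((List.range j).filter (fun i => names.getD i "" == x)).length := by
  rw [pvTake_eq_map names j hj, List.count_eq_countP, List.countP_map, List.countP_eq_length_filter]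
  rfl

theorem pvFilterRangePos (p : Nat → Bool) (n m : Nat)
    (hm : m < ((List.range n).filter p).length) (j : Nat)
    (hj : ((List.range n).filter p)[m] = j) :
    ((List.range j).filter p).length = m := by
  have hmem : j ∈ (List.range n).filter p := hj ▸ List.getElem_mem hm
  have hmem' : j ∈ List.range n ∧ p j = true := List.mem_filter.mp hmem
  have hjn : j < n := List.mem_range.mp hmem'.1
  have hsplit : List.range n = List.range j ++ (List.range (n - j)).map (fun k => j + k) := by
    rw [← List.range_add]
    congr 1
    omega
  have hsecond : (List.range (n - j)).map (fun k => j + k)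
      = j :: (List.range (n - j - 1)).map (fun k => j + 1 + k) := by
    have h1 : n - j = (n - j - 1) + 1 := by omega
    rw [h1, List.range_succ_eq_map, List.map_cons, List.map_map]
    congr 1
    · apply List.map_congr_left
      intro k _
      simp [Function.comp]
      omega
  have hLa : (List.range n).filter p = (List.range j).filter p
      ++ j :: ((List.range (n - j - 1)).map (fun k => j + 1 + k)).filter p := by
    rw [hsplit, List.filter_append, hsecond, List.filter_cons, hmem'.2]
    simp
  have hpw : ((List.range n).filter p).Pairwise (· < ·) :=
    List.Pairwise.filter p (List.pairwise_lt_range)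
  have hnd : ((List.range n).filter p).Nodup := hpw.imp (fun h => Nat.ne_of_lt h)
  have hlen : ((List.range j).filter p).length < ((List.range n).filter p).length := by
    conv_rhs => rw [hLa]
    simp
  have hval : ((List.range n).filter p)[((List.range j).filter p).length]'hlen
      = ((List.range n).filter p)[m] := by
    rw [hj, List.getElem_of_eq hLa, List.getElem_append_right (le_refl _)]
    simp
  exact (List.Nodup.getElem_inj_iff hnd).mp hval

def pvIdxs (names : List String) (x : String) : List Nat :=
  (List.range names.length).filter (fun j => names.getD j "" == x)

theorem pvIdxs_getElem (names : List String) (x : String) (m : Nat)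
    (hm : m < (pvIdxs names x).length) :
    (pvIdxs names x)[m] < names.length ∧ names.getD ((pvIdxs names x)[m]) "" = x ∧
      (names.take ((pvIdxs names x)[m])).count x = m := by
  unfold pvIdxs at hm ⊢
  set p : Nat → Bool := fun j => names.getD j "" == x with hp
  set L : List Nat := (List.range names.length).filter p with hL
  have hmem : L[m] ∈ L := List.getElem_mem hm
  have hmem' : L[m] ∈ List.range names.length ∧ p (L[m]) = true := List.mem_filter.mp (by rw [← hL]; exact hmem)
  have hjn : L[m] < names.length := List.mem_range.mp hmem'.1
  have hjx : names.getD (L[m]) "" = x := by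
    have := hmem'.2; simpa [hp] using this
  refine ⟨hjn, hjx, ?_⟩
  rw [pvCount_take names x _ (le_of_lt hjn)]
  exact pvFilterRangePos p names.length m hm _ rfl

def pvIdxsI (names : List String) (x : String) : List Int :=
  (pvIdxs names x).map (fun j : Nat => (j : Int))

def pvMapP (names : List String) (P : List String) : List String :=
  (List.range names.length).map
    (fun j => if names.getD j "" ∈ P then pvBval names j else names.getD j "")

def pvCur (names : List String) (P : List String) (x : String) (s : Nat) : List String :=
  (List.range names.length).map
    (fun j => if names.getD j "" ∈ P ∨ (names.getD j "" = x ∧ (names.take j).count x < s)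
              then pvBval names j else names.getD j "")

theorem pvCur_succ_of_set (names : List String) (P : List String) (x : String) (s : Nat)
    (a : Nat) (ha : a < names.length) (hax : names.getD a "" = x)
    (hcnt : (names.take a).count x = s) (hs : s ≠ 0) :
    PySem.List.pySetD (pvCur names P x s) (a : Int) (x ++ PySem.Int.toStr (s : Int))
      = pvCur names P x (s + 1) := by
  have hlen : a < (pvCur names P x s).length := by simp [pvCur, ha]
  rw [pvSetD_natCast _ _ _ hlen]
  unfold pvCur
  rw [pvMap_range_set _ _ _ ha]
  apply List.map_congr_left
  intro j hj
  rw [List.mem_range] at hj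
  by_cases hja : j = a
  · subst hja
    rw [if_pos rfl, if_pos (Or.inr ⟨hax, by omega⟩)]
    rw [pvBval_of_pos _ _ (by rw [hax, hcnt]; exact hs), hax, hcnt]
  · rw [if_neg hja]
    by_cases hjx : names.getD j "" = x
    · have hne : (names.take j).count x ≠ s := by
        intro hc
        apply hja
        rcases lt_trichotomy j a with h | h | h
        · have := pvCount_mono names x j a h (le_of_lt ha) hjx; omega
        · exact h
        · have := pvCount_mono names x a j h (le_of_lt hj) hax; omega
      by_cases hcl : (names.take j).count x < s
      · rw [if_pos (Or.inr ⟨hjx, hcl⟩), if_pos (Or.inr ⟨hjx, by omega⟩)]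
      · have h1 : ¬ (names.take j).count x < s + 1 := by omega
        by_cases hP : names.getD j "" ∈ P
        · rw [if_pos (Or.inl hP), if_pos (Or.inl hP)]
        · rw [if_neg (by tauto), if_neg (by tauto)]
    · by_cases hP : names.getD j "" ∈ P
      · rw [if_pos (Or.inl hP), if_pos (Or.inl hP)]
      · rw [if_neg (by tauto), if_neg (by tauto)]

theorem pvCur_zero_one (names : List String) (P : List String) (x : String) :
    pvCur names P x 0 = pvCur names P x 1 := by
  unfold pvCur
  apply List.map_congr_left
  intro j hj
  by_cases hP : names.getD j "" ∈ P
  · rw [if_pos (Or.inl hP), if_pos (Or.inl hP)]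
  · by_cases hjx : names.getD j "" = x
    · by_cases hc : (names.take j).count x = 0
      · rw [if_neg (by rintro (h | ⟨-, h⟩); exacts [hP h, by omega]),
          if_pos (Or.inr ⟨hjx, by omega⟩)]
        rw [pvBval_of_zero _ _ (by rw [hjx]; exact hc)]
      · rw [if_neg (by rintro (h | ⟨-, h⟩); exacts [hP h, by omega]),
          if_neg (by rintro (h | ⟨-, h⟩); exacts [hP h, by omega])]
    · rw [if_neg (by tauto), if_neg (by tauto)]

theorem pvMapP_eq_cur_zero (names : List String) (P : List String) (x : String) :
    pvMapP names P = pvCur names P x 0 := by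
  unfold pvMapP pvCur
  apply List.map_congr_left
  intro j _
  by_cases hP : names.getD j "" ∈ P
  · rw [if_pos hP, if_pos (Or.inl hP)]
  · rw [if_neg hP, if_neg (by rintro (h | ⟨-, h⟩); exacts [hP h, by omega])]

theorem pvCur_full (names : List String) (P : List String) (x : String) :
    pvCur names P x (pvIdxs names x).length = pvMapP names (P ++ [x]) := by
  unfold pvMapP pvCur
  apply List.map_congr_left
  intro j hj
  rw [List.mem_range] at hj
  by_cases hP : names.getD j "" ∈ P
  · rw [if_pos (Or.inl hP), if_pos (List.mem_append_left _ hP)]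
  · by_cases hjx : names.getD j "" = x
    · have hlt : (names.take j).count x < (pvIdxs names x).length := by
        have h1 : (names.take j).count x < (names.take (j+1)).count x :=
          pvCount_mono names x j (j+1) (Nat.lt_succ_self j) hj hjx
        have h2 : (names.take (j+1)).count x ≤ names.count x :=
          List.Sublist.count_le x (List.take_sublist _ _)
        have h3 : names.count x = (pvIdxs names x).length := by
          have := pvCount_take names x names.length le_rfl
          rw [List.take_length] at this
          exact this
        omega
      rw [if_pos (Or.inr ⟨hjx, hlt⟩), if_pos (List.mem_append_right _ (by rw [List.mem_singleton]; exact hjx))]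
    · rw [if_neg (by rintro (h | ⟨h, -⟩); exacts [hP h, hjx h]),
        if_neg (by rw [List.mem_append]; rintro (h | h); exacts [hP h, hjx (by simpa using h)])]

theorem pvInner (names : List String) (x : String) (P : List String) (r : List Nat) (s : Nat)
    (hr : ∀ m (hm : m < r.length), r[m] < names.length ∧ names.getD r[m] "" = x ∧
      (names.take r[m]).count x = s + m) :
    (PySem.List.enumerate (r.map (fun j : Nat => (j : Int))) (s : Int)).foldl (AltAssign x)
        (pvCur names P x s)
      = pvCur names P x (s + r.length) := by
  induction r generalizing s with
  | nil => simp [PySem.List.enumerate_nil]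
  | cons a r' ih =>
    obtain ⟨ha, hax, hcnt⟩ := hr 0 (by simp)
    simp only [List.getElem_cons_zero, Nat.add_zero] at ha hax hcnt
    rw [show (a :: r').map (fun j : Nat => (j : Int)) = (a : Int) :: r'.map (fun j : Nat => (j : Int)) from rfl,
      PySem.List.enumerate_cons, List.foldl_cons]
    have hstep : AltAssign x (pvCur names P x s) ((s : Int), (a : Int))
        = pvCur names P x (s + 1) := by
      by_cases hs : s = 0
      · subst hs
        simp only [AltAssign, Nat.cast_zero, ne_eq, not_true_eq_false, if_false]
        exact pvCur_zero_one names P x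
      · have hsi : (s : Int) ≠ 0 := by exact_mod_cast hs
        simp only [AltAssign, if_pos hsi]
        exact pvCur_succ_of_set names P x s a ha hax hcnt hs
    rw [hstep]
    have hcast : (s : Int) + 1 = ((s + 1 : Nat) : Int) := by push_cast; ring
    rw [hcast]
    have := ih (s + 1) (fun m hm => by
      obtain ⟨h1, h2, h3⟩ := hr (m + 1) (by simpa using Nat.succ_lt_succ hm)
      simp only [List.getElem_cons_succ] at h1 h2 h3
      exact ⟨h1, h2, by omega⟩)
    rw [this]
    congr 1
    simp only [List.length_cons]
    omega

theorem pvOuter (names : List String) (K P : List String) (hnd : K.Nodup) :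
    K.foldl (fun ns x =>
        (PySem.List.enumerate (pvIdxsI names x)).foldl (AltAssign x) ns)
      (pvMapP names P)
    = pvMapP names (P ++ K) := by
  induction K generalizing P with
  | nil => simp
  | cons x K' ih =>
    rw [List.foldl_cons]
    have hx : (PySem.List.enumerate (pvIdxsI names x)).foldl (AltAssign x) (pvMapP names P)
        = pvMapP names (P ++ [x]) := by
      rw [pvMapP_eq_cur_zero names P x]
      have h0 : PySem.List.enumerate (pvIdxsI names x)
          = PySem.List.enumerate (pvIdxsI names x) ((0 : Nat) : Int) := by norm_num
      rw [h0]
      unfold pvIdxsI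
      rw [pvInner names x P (pvIdxs names x) 0
        (fun m hm => by simpa using pvIdxs_getElem names x m hm)]
      rw [Nat.zero_add, pvCur_full]
    rw [hx, ih (P ++ [x]) (List.Nodup.of_cons hnd), List.append_assoc]
    rfl

theorem pvGroups_keys (names : List String) :
    (AltGroups names).keys = PySem.Set.ofList names := by
  unfold AltGroups
  rw [PySem.Dict.keys_foldl_modify_key (PySem.List.enumerate names) (fun p => p.2) []
    (fun _ p => (fun t => t ++ [p.1])) PySem.Dict.empty]
  rw [PySem.Dict.keys_empty, PySem.List.map_snd_enumerate, PySem.Set.update_nil_left]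

theorem pvGroups_nodup (names : List String) : (AltGroups names).keys.Nodup := by
  rw [pvGroups_keys]
  exact PySem.Set.nodup_ofList names

theorem pvGroups_getD (names : List String) (x : String) :
    (AltGroups names).getD x [] = pvIdxsI names x := by
  unfold AltGroups
  have hswap : ∀ (l : List (Int × String)) (d : PySem.Dict String (List Int)),
      l.foldl (fun d p => d.modify p.2 [] (fun t => t ++ [p.1])) d
        = (l.map Prod.swap).foldl (fun d p => d.modify p.1 [] (fun t => t ++ [p.2])) d := by
    intro l d
    rw [List.foldl_map]
    rfl
  rw [hswap, PySem.Dict.getD_foldl_modify_append, PySem.Dict.getD_empty, List.nil_append]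
  rw [PySem.List.enumerate_eq_map_pyRange names ""]
  have hlen : PySem.List.len names = ((names.length : Nat) : Int) := by
    simp [PySem.List.len]
  rw [hlen, PySem.List.pyRange_zero_nat]
  conv_lhs => rw [List.filter_map, List.map_map, List.filter_map, List.map_map, List.filter_map, List.map_map]
  simp only [Function.comp_def, PySem.List.pyGetD_natCast]
  unfold pvIdxsI pvIdxs
  rfl

theorem pvMapP_nil (names : List String) : pvMapP names [] = names := by
  unfold pvMapP
  apply List.ext_getElem
  · simp
  · intro i h1 h2
    simp [List.getD, List.getElem?_eq_getElem h2]

theorem pvAlt_eq (names : List String) :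
    DistinguishUsername_alt names = pvMapP names (PySem.Set.ofList names) := by
  unfold DistinguishUsername_alt
  have hitems : (AltGroups names).items
      = (PySem.Set.ofList names).map (fun x => (x, pvIdxsI names x)) := by
    rw [PySem.Dict.items_eq_map_keys (AltGroups names) (pvGroups_nodup names) [],
      pvGroups_keys]
    apply List.map_congr_left
    intro x _
    rw [pvGroups_getD]
  rw [hitems, List.foldl_map]
  have h := pvOuter names (PySem.Set.ofList names) [] (PySem.Set.nodup_ofList names)
  rw [pvMapP_nil, List.nil_append] at h
  exact h

-- ===== VERDICT (by name: the statement is the Claim_ definition above) =====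
theorem DistinguishUsername_spec : Claim_equal_DistinguishUsername := by
  intro names _
  show DistinguishUsername names = DistinguishUsername_alt names
  rw [pvAlt_eq]
  unfold DistinguishUsername pvMapP
  rw [(pvInv names names.length le_rfl).2]
  apply List.map_congr_left
  intro j hj
  rw [List.mem_range] at hj
  have hmem : names.getD j "" ∈ PySem.Set.ofList names := by
    rw [PySem.Set.mem_ofList]
    rw [List.getD_eq_getElem?_getD, List.getElem?_eq_getElem hj]
    exact List.getElem_mem hj
  rw [if_pos hj, if_pos hmem]
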